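-- pv_equiv track=rewrite | github.com/GeorgeGithiri5/Dynamic_Programming | nCr.py | nCrModp
-- ===== SOURCE A (Python) =====
-- def nCrModp(n,r,p):
--     if(r>n-r):
--         r = n - r
--     C = [0 for i in range(r+1)]
--     C[0] = 1
--     for i in range(1,n+1):
--         for j in range(min(i,r),0,-1):
--             C[j] = (C[j] + C[j-1]) % p
--     return C[r]
-- ===== SOURCE B (Python) =====
-- def nCrModp(n, r, p):
--     if r < 0 or r > n:
--         raise ValueError("r must be in the range 0..n")
--     r = min(r, n - r)
--     result = 1
--     for i in range(r):
--         result = result * (n - i) // (i + 1)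
--     return result % p
-- ===== Notes on version B (the rewrite author's own statement) =====
-- stated objective: faster
-- what changed: Replaces the O(n*r) Pascal-triangle table fill (with a mod at every cell update) by input validation plus a single O(r) forward multiplicative pass building the exact binomial with exact integer division, taking % p once at the end.
-- intended difference: On r = 0 or r = n with p = 1 or p < 0, A returns 1 because the C[0] cell it returns is initialised to 1 and never reduced mod p, while B returns 1 % p (0 for p = 1, a nonpositive value for p < 0), which is the intended residue of C(n,r) modulo p. — e.g. on nCrModp(3, 0, 1): A returns 1, B returns 0
-- outside the precondition, e.g. on nCrModp(3, 0, 0): A returns 1, B raises ZeroDivisionError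
import Mathlib
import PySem

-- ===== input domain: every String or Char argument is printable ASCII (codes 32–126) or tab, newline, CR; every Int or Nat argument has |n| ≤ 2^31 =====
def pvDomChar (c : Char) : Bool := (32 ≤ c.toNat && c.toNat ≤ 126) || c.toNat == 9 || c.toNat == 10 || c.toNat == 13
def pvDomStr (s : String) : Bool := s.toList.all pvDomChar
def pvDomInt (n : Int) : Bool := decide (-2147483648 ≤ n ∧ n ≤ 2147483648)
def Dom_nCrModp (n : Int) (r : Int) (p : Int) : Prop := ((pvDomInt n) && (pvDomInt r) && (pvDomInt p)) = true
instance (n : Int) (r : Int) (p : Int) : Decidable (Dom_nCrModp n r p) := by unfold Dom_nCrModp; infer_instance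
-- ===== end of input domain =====

-- B replaces A's O(n*r) Pascal-table fill by a single O(r) exact multiplicative pass with one final % p;
-- on r ∈ {0, n} with p = 1 or p < 0 A returns an unreduced 1 while B returns the intended residue 1 % p (see D_).


-- ===== PORT A =====
def nCrModp (n : Int) (r : Int) (p : Int) : Int :=
  let r := if r > n - r then n - r else r
  let C : List Int := (PySem.List.pyRange 0 (r + 1) 1).map (fun _ => 0)
  let C := PySem.List.pySetD C 0 1
  let C := (PySem.List.pyRange 1 (n + 1) 1).foldl (fun C i =>
    (PySem.List.pyRange (min i r) 0 (-1)).foldl (fun C j =>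
      PySem.List.pySetD C j
        (PySem.Int.mod (PySem.List.pyGetD C j 0 + PySem.List.pyGetD C (j - 1) 0) p)) C) C
  PySem.List.pyGetD C r 0

-- ===== PORT B =====
def nCrModp_alt (n : Int) (r : Int) (p : Int) : Int :=
  -- 'if r < 0 or r > n: raise ValueError(...)': Python raises here, Pre_ excludes these inputs
  -- (the 0 below is a dummy value, never claimed about)
  if r < 0 ∨ n < r then 0
  else
    let r := min r (n - r)
    let result := (PySem.List.pyRange 0 r 1).foldl
      (fun acc i => PySem.Int.floordiv (acc * (n - i)) (i + 1)) 1
    PySem.Int.mod result p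

-- ===== PRECONDITION & SPEC =====
-- Pre_ excludes r < 0 and r > n, where A raises IndexError, and p = 0, where A raises
-- ZeroDivisionError except in the degenerate case r ∈ {0, n} (A then returns the untouched 1
-- without ever taking % p, while B's final % 0 raises ZeroDivisionError).
def Pre_nCrModp (n : Int) (r : Int) (p : Int) : Prop := 0 ≤ r ∧ r ≤ n ∧ p ≠ 0
instance (n : Int) (r : Int) (p : Int) : Decidable (Pre_nCrModp n r p) := by unfold Pre_nCrModp; infer_instance
def pvWitness_nCrModp : Int × Int × Int := (5, 2, 7)

-- On r = 0 or r = n with p = 1 or p < 0, A returns 1 (the C[0] cell it returns is initialised to 1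
-- and never reduced mod p) while B returns 1 % p (0 for p = 1, nonpositive for p < 0), the intended
-- residue of C(n,r) modulo p.
def D_nCrModp (n : Int) (r : Int) (p : Int) : Prop := (r = 0 ∨ r = n) ∧ (p = 1 ∨ p < 0)
instance (n : Int) (r : Int) (p : Int) : Decidable (D_nCrModp n r p) := by unfold D_nCrModp; infer_instance
def Spec_nCrModp (n : Int) (r : Int) (p : Int) (out : Int) : Prop := ¬ D_nCrModp n r p → out = nCrModp_alt n r p
instance (n : Int) (r : Int) (p : Int) (out : Int) : Decidable (Spec_nCrModp n r p out) := by unfold Spec_nCrModp; infer_instance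
def pvDiffWitness_nCrModp : Int × Int × Int := (3, 0, 1)
def pvDiffWitnessOut_nCrModp : Int × Int := (1, 0)

-- ===== CLAIM =====
def Claim_unchanged_nCrModp : Prop := ∀ (n : Int) (r : Int) (p : Int), Dom_nCrModp n r p → Pre_nCrModp n r p → Spec_nCrModp n r p (nCrModp n r p)
def Claim_changed_nCrModp : Prop := Dom_nCrModp (pvDiffWitness_nCrModp.1) (pvDiffWitness_nCrModp.2.1) (pvDiffWitness_nCrModp.2.2) ∧ Pre_nCrModp (pvDiffWitness_nCrModp.1) (pvDiffWitness_nCrModp.2.1) (pvDiffWitness_nCrModp.2.2) ∧ D_nCrModp (pvDiffWitness_nCrModp.1) (pvDiffWitness_nCrModp.2.1) (pvDiffWitness_nCrModp.2.2) ∧ nCrModp (pvDiffWitness_nCrModp.1) (pvDiffWitness_nCrModp.2.1) (pvDiffWitness_nCrModp.2.2) = pvDiffWitnessOut_nCrModp.1 ∧ nCrModp_alt (pvDiffWitness_nCrModp.1) (pvDiffWitness_nCrModp.2.1) (pvDiffWitness_nCrModp.2.2) = pvDiffWitnessOut_nCrModp.2 ∧ pvDiffWitnessOut_nCrModp.1 ≠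 pvDiffWitnessOut_nCrModp.2
def Claim_exact_nCrModp : Prop := ∀ (n : Int) (r : Int) (p : Int), Dom_nCrModp n r p → Pre_nCrModp n r p → D_nCrModp n r p → nCrModp n r p ≠ nCrModp_alt n r p

-- ===== LEMMAS AND PROOFS =====

-- fmod is invariant under adding a multiple of the modulus
theorem pv_fmod_shift (x c p : Int) : (x + c * p).fmod p = x.fmod p := by
  rw [Int.fmod_eq_emod, Int.fmod_eq_emod]
  have hd : p ∣ c * p := Dvd.intro_left c rfl
  have h1 : (p ∣ x + c * p) ↔ (p ∣ x) := by
    constructor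
    · intro h; have := dvd_sub h hd; simpa using this
    · intro h; exact dvd_add h hd
  have h2 : (x + c * p) % p = x % p := by
    have := Int.add_mul_emod_self_left (a := x) (b := p) (c := c)
    calc (x + c * p) % p = (x + p * c) % p := by ring_nf
    _ = x % p := this
  rw [h2]
  simp only [h1]

-- reducing the left (resp. right) summand first does not change the sum's residue
theorem pv_mod_add_left (a b p : Int) :
    PySem.Int.mod (PySem.Int.mod a p + b) p = PySem.Int.mod (a + b) p := by
  show (a.fmod p + b).fmod p = (a + b).fmod p
  have h : a.fmod p + b = (a + b) + (-(a.fdiv p)) * p := by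
    rw [Int.fmod_def]; ring
  rw [h, pv_fmod_shift]

theorem pv_mod_add_right (a b p : Int) :
    PySem.Int.mod (a + PySem.Int.mod b p) p = PySem.Int.mod (a + b) p := by
  rw [add_comm a, pv_mod_add_left, add_comm]

-- ===== B side: the multiplicative pass computes the exact binomial =====
theorem pv_B_loop (n : Int) (N K : Nat) (hn : n = (N : Int)) (h : K ≤ N) :
    (PySem.List.pyRange 0 (K : Int) 1).foldl
      (fun acc i => PySem.Int.floordiv (acc * (n - i)) (i + 1)) 1 = (N.choose K : Int) := by
  induction K with
  | zero => simp [PySem.List.pyRange_one_eq_nil]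
  | succ k ih =>
    have hk : k ≤ N := Nat.le_of_succ_le h
    have hsplit : PySem.List.pyRange 0 ((k + 1 : Nat) : Int) 1
        = PySem.List.pyRange 0 (k : Int) 1 ++ [(k : Int)] := by
      push_cast
      exact PySem.List.pyRange_one_succ_right (by positivity)
    rw [hsplit, List.foldl_append, ih hk]
    simp only [List.foldl_cons, List.foldl_nil]
    have hkN : k < N := h
    have hcast : (n - (k : Int)) = ((N - k : Nat) : Int) := by omega
    have hnat : N.choose (k + 1) * (k + 1) = N.choose k * (N - k) := Nat.choose_succ_right_eq N k
    have hstep : (N.choose k : Int) * (n - (k : Int)) = (N.choose (k + 1) : Int) * ((k : Int) + 1) := by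
      rw [hcast]; exact_mod_cast hnat.symm
    show PySem.Int.floordiv ((N.choose k : Int) * (n - (k : Int))) ((k : Int) + 1) = _
    rw [hstep]
    show ((N.choose (k + 1) : Int) * ((k : Int) + 1)).fdiv ((k : Int) + 1) = _
    rw [Int.mul_fdiv_cancel _ (by positivity : (0:Int) < (k : Int) + 1).ne']

-- ===== A side: the Pascal table =====
-- the model of the list C after outer iteration i (row i of Pascal's triangle mod p, C[0] unreduced)
def pascalRow (p : Int) (i R : Nat) : List Int :=
  (List.range (R + 1)).map (fun j => if j = 0 then 1 else PySem.Int.mod ((i.choose j : Nat) : Int) p)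

theorem pv_length_pascalRow (p : Int) (i R : Nat) : (pascalRow p i R).length = R + 1 := by
  simp [pascalRow]

theorem pv_pyGetD_pascalRow (p : Int) (i R k : Nat) (hk : k < R + 1) :
    PySem.List.pyGetD (pascalRow p i R) (k : Int) 0
      = if k = 0 then 1 else PySem.Int.mod ((i.choose k : Nat) : Int) p := by
  rw [PySem.List.pyGetD_natCast]
  simp [pascalRow, List.getD_eq_getElem?_getD, hk]

-- two Int lists with equal length and equal pyGetD reads are equal
theorem pv_list_eq_of_pyGetD (l₁ l₂ : List Int) (hlen : l₁.length = l₂.length)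
    (h : ∀ k : Nat, k < l₁.length → PySem.List.pyGetD l₁ (k : Int) 0 = PySem.List.pyGetD l₂ (k : Int) 0) :
    l₁ = l₂ := by
  apply List.ext_getElem hlen
  intro k hk1 hk2
  have := h k hk1
  rwa [PySem.List.pyGetD_natCast, PySem.List.pyGetD_natCast,
    List.getD_eq_getElem?_getD, List.getD_eq_getElem?_getD,
    List.getElem?_eq_getElem hk1, List.getElem?_eq_getElem hk2] at this

-- the inner countdown loop: cells 1..m get (C[j]+C[j-1]) % p from the OLD row, the rest is untouched
theorem pv_inner_spec (p : Int) (m : Nat) : ∀ (C : List Int), m < C.length →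
    (((PySem.List.pyRange (m : Int) 0 (-1)).foldl (fun C j =>
        PySem.List.pySetD C j
          (PySem.Int.mod (PySem.List.pyGetD C j 0 + PySem.List.pyGetD C (j - 1) 0) p)) C).length = C.length
      ∧ ∀ k : Nat, PySem.List.pyGetD ((PySem.List.pyRange (m : Int) 0 (-1)).foldl (fun C j =>
          PySem.List.pySetD C j
            (PySem.Int.mod (PySem.List.pyGetD C j 0 + PySem.List.pyGetD C (j - 1) 0) p)) C) (k : Int) 0
        = if 1 ≤ k ∧ k ≤ m then
            PySem.Int.mod (PySem.List.pyGetD C (k : Int) 0 + PySem.List.pyGetD C ((k - 1 : Nat) : Int) 0) p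
          else PySem.List.pyGetD C (k : Int) 0) := by
  induction m with
  | zero =>
    intro C _
    rw [PySem.List.pyRange_neg_one_eq_nil (by norm_num)]
    exact ⟨rfl, fun k => by rw [List.foldl_nil, if_neg (by omega)]⟩
  | succ m ih =>
    intro C hm
    have hcons : PySem.List.pyRange ((m + 1 : Nat) : Int) 0 (-1)
        = ((m + 1 : Nat) : Int) :: PySem.List.pyRange ((m : Nat) : Int) 0 (-1) := by
      have h1 := PySem.List.pyRange_neg_one_cons (a := ((m + 1 : Nat) : Int)) (b := 0) (by positivity)
      have h2 : ((m + 1 : Nat) : Int) - 1 = ((m : Nat) : Int) := by push_cast; ring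
      rwa [h2] at h1
    rw [hcons]
    simp only [List.foldl_cons]
    set v := PySem.Int.mod (PySem.List.pyGetD C ((m + 1 : Nat) : Int) 0
      + PySem.List.pyGetD C (((m + 1 : Nat) : Int) - 1) 0) p with hv
    set C₁ := PySem.List.pySetD C ((m + 1 : Nat) : Int) v with hC₁
    have hlen₁ : C₁.length = C.length := PySem.List.length_pySetD C _ v
    have hm₁ : m < C₁.length := by omega
    obtain ⟨hlen₂, hget₂⟩ := ih C₁ hm₁
    have hread : ∀ t : Nat, PySem.List.pyGetD C₁ (t : Int) 0
        = if t = m + 1 then v else PySem.List.pyGetD C (t : Int) 0 := by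
      intro t
      have := PySem.List.pyGetD_pySetD_natCast C (m + 1) t v 0 hm
      rwa [← hC₁] at this
    refine ⟨by rw [hlen₂, hlen₁], fun k => ?_⟩
    rw [hget₂ k]
    by_cases hk1 : 1 ≤ k ∧ k ≤ m
    · rw [if_pos hk1, if_pos ⟨hk1.1, Nat.le_succ_of_le hk1.2⟩,
        hread k, hread (k - 1), if_neg (by omega), if_neg (by omega)]
    · by_cases hk2 : k = m + 1
      · subst hk2
        rw [if_neg hk1, hread (m + 1), if_pos rfl, if_pos ⟨by omega, le_rfl⟩, hv]
        have e : ((m + 1 : Nat) : Int) - 1 = ((m + 1 - 1 : Nat) : Int) := by push_cast; ring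
        rw [e]
      · rw [if_neg hk1, if_neg (by omega), hread k, if_neg (by omega)]

-- the outer loop carries pascalRow as invariant
theorem pv_outer_spec (p : Int) (R N : Nat) :
    (PySem.List.pyRange 1 ((N : Int) + 1) 1).foldl (fun C i =>
      (PySem.List.pyRange (min i (R : Int)) 0 (-1)).foldl (fun C j =>
        PySem.List.pySetD C j
          (PySem.Int.mod (PySem.List.pyGetD C j 0 + PySem.List.pyGetD C (j - 1) 0) p)) C)
      (pascalRow p 0 R) = pascalRow p N R := by
  induction N with
  | zero => rw [PySem.List.pyRange_one_eq_nil (by norm_num)]; rfl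
  | succ N ih =>
    have hsplit : PySem.List.pyRange 1 (((N + 1 : Nat) : Int) + 1) 1
        = PySem.List.pyRange 1 ((N : Int) + 1) 1 ++ [(N : Int) + 1] := by
      push_cast
      exact PySem.List.pyRange_one_succ_right (by omega)
    rw [hsplit, List.foldl_append, ih]
    simp only [List.foldl_cons, List.foldl_nil]
    have hmin : min ((N : Int) + 1) (R : Int) = ((min (N + 1) R : Nat) : Int) := by
      push_cast; omega
    rw [hmin]
    have hmlt : min (N + 1) R < (pascalRow p N R).length := by
      rw [pv_length_pascalRow]; omega
    obtain ⟨hlen, hget⟩ := pv_inner_spec p (min (N + 1) R) (pascalRow p N R) hmlt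
    apply pv_list_eq_of_pyGetD _ _ (by rw [hlen, pv_length_pascalRow, pv_length_pascalRow])
    intro k hk
    rw [hlen, pv_length_pascalRow] at hk
    rw [hget k, pv_pyGetD_pascalRow p (N + 1) R k hk]
    by_cases hk0 : k = 0
    · subst hk0
      rw [if_neg (by omega), pv_pyGetD_pascalRow p N R 0 hk, if_pos rfl, if_pos rfl]
    · by_cases hkm : k ≤ min (N + 1) R
      · rw [if_pos ⟨by omega, hkm⟩, if_neg hk0,
          pv_pyGetD_pascalRow p N R k hk, pv_pyGetD_pascalRow p N R (k - 1) (by omega),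
          if_neg hk0]
        have hpascal : (N + 1).choose k = N.choose (k - 1) + N.choose k := by
          obtain ⟨k', rfl⟩ : ∃ k', k = k' + 1 := ⟨k - 1, by omega⟩
          simpa [Nat.add_comm] using Nat.choose_succ_succ N k'
        by_cases hk1' : k - 1 = 0
        · rw [if_pos hk1', pv_mod_add_left]
          congr 1
          have hke : k = 1 := by omega
          subst hke
          simp [Nat.choose_one_right]
        · rw [if_neg hk1', pv_mod_add_left, pv_mod_add_right]
          congr 1
          rw [hpascal]
          push_cast
          ring
      · rw [if_neg (by omega), if_neg hk0, pv_pyGetD_pascalRow p N R k hk, if_neg hk0]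
        have hbig : N + 1 < k := by omega
        rw [Nat.choose_eq_zero_of_lt hbig, Nat.choose_eq_zero_of_lt (by omega)]

-- the initial list of A is pascalRow at i = 0
theorem pv_init_row (p : Int) (R : Nat) :
    PySem.List.pySetD ((PySem.List.pyRange 0 ((R : Int) + 1) 1).map (fun _ => (0 : Int))) 0 1
      = pascalRow p 0 R := by
  have e : ((R : Int) + 1) = ((R + 1 : Nat) : Int) := by push_cast; ring
  rw [e]
  apply pv_list_eq_of_pyGetD
  · rw [PySem.List.length_pySetD, pv_length_pascalRow]
    simp [PySem.List.length_pyRange_one]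
  · intro k hk
    rw [PySem.List.length_pySetD] at hk
    simp only [List.length_map, PySem.List.length_pyRange_one] at hk
    have hkR : k < R + 1 := by omega
    have hlen0 : 0 < ((PySem.List.pyRange 0 ((R + 1 : Nat) : Int) 1).map (fun _ => (0 : Int))).length := by
      simp [PySem.List.length_pyRange_one]
    have hset := PySem.List.pyGetD_pySetD_natCast
      ((PySem.List.pyRange 0 ((R + 1 : Nat) : Int) 1).map (fun _ => (0 : Int))) 0 k 1 0 hlen0
    simp only [Nat.cast_zero] at hset
    rw [hset, pv_pyGetD_pascalRow p 0 R k hkR]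
    by_cases hk0 : k = 0
    · rw [if_pos hk0, if_pos hk0]
    · rw [if_neg hk0, if_neg hk0,
        PySem.List.pyGetD_map_pyRange (fun _ => (0 : Int)) (R + 1) k 0 hkR,
        Nat.choose_eq_zero_of_lt (by omega : (0 : Nat) < k), Nat.cast_zero]
      show (0 : Int) = Int.fmod 0 p
      rw [Int.zero_fmod]

-- closed form of A's result under Pre_
theorem pv_A_val (n r p : Int) (h0 : 0 ≤ r) (h1 : r ≤ n) :
    nCrModp n r p =
      (if (if r > n - r then n - r else r) = 0 then 1
       else PySem.Int.mod ((n.toNat.choose (if r > n - r then n - r else r).toNat : Nat) : Int) p) := by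
  unfold nCrModp
  set r' := if r > n - r then n - r else r with hr'
  have hr0 : 0 ≤ r' := by rw [hr']; split <;> omega
  have hrn : r' ≤ n := by rw [hr']; split <;> omega
  obtain ⟨R, hR⟩ : ∃ R : Nat, r' = (R : Int) := ⟨r'.toNat, by omega⟩
  obtain ⟨N, hN⟩ : ∃ N : Nat, n = (N : Int) := ⟨n.toNat, by omega⟩
  simp only
  rw [hR, hN, pv_init_row p R, pv_outer_spec p R N,
    pv_pyGetD_pascalRow p N R R (by omega)]
  simp [Int.toNat_natCast]

-- closed form of B's result under Pre_
theorem pv_B_val (n r p : Int) (h0 : 0 ≤ r) (h1 : r ≤ n) :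
    nCrModp_alt n r p =
      PySem.Int.mod ((n.toNat.choose (if r > n - r then n - r else r).toNat : Nat) : Int) p := by
  unfold nCrModp_alt
  rw [if_neg (by omega)]
  have hm : min r (n - r) = if r > n - r then n - r else r := by split <;> omega
  rw [hm]
  set r' := if r > n - r then n - r else r with hr'
  have hr0 : 0 ≤ r' := by rw [hr']; split <;> omega
  have hrn : r' ≤ n := by rw [hr']; split <;> omega
  obtain ⟨R, hR⟩ : ∃ R : Nat, r' = (R : Int) := ⟨r'.toNat, by omega⟩
  obtain ⟨N, hN⟩ : ∃ N : Nat, n = (N : Int) := ⟨n.toNat, by omega⟩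
  simp only
  rw [hR, pv_B_loop n N R hN (by omega), hN]
  simp [Int.toNat_natCast]

-- r' = 0 exactly on the boundary r ∈ {0, n}
theorem pv_red_zero (n r : Int) (h0 : 0 ≤ r) (h1 : r ≤ n) :
    ((if r > n - r then n - r else r) = 0) ↔ (r = 0 ∨ r = n) := by
  split <;> omega

-- ===== VERDICT =====
theorem nCrModp_spec : Claim_unchanged_nCrModp := by
  intro n r p _ hpre hnd
  obtain ⟨h0, h1, hp⟩ := hpre
  rw [pv_A_val n r p h0 h1, pv_B_val n r p h0 h1]
  by_cases hz : (if r > n - r then n - r else r) = 0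
  · rw [if_pos hz, hz]
    have hbound := (pv_red_zero n r h0 h1).mp hz
    have hnp : ¬ (p = 1 ∨ p < 0) := fun h => hnd ⟨hbound, h⟩
    have hp2 : 2 ≤ p := by omega
    simp only [Int.toNat_zero, Nat.choose_zero_right, Nat.cast_one]
    show (1 : Int) = Int.fmod 1 p
    rw [Int.fmod_eq_emod, if_pos (Or.inl (by omega)), Int.emod_eq_of_lt (by norm_num) (by omega)]
    omega
  · rw [if_neg hz]

theorem nCrModp_changed : Claim_changed_nCrModp := by unfold Claim_changed_nCrModp; decide

theorem nCrModp_tight : Claim_exact_nCrModp := by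
  intro n r p _ hpre hd
  obtain ⟨h0, h1, hp⟩ := hpre
  obtain ⟨hb, hpm⟩ := hd
  have hz := (pv_red_zero n r h0 h1).mpr hb
  rw [pv_A_val n r p h0 h1, pv_B_val n r p h0 h1, if_pos hz, hz]
  simp only [Int.toNat_zero, Nat.choose_zero_right, Nat.cast_one]
  show (1 : Int) ≠ PySem.Int.mod 1 p
  rcases hpm with h1p | hneg
  · subst h1p
    decide
  · have := PySem.Int.mod_neg_bounds (a := 1) (b := p) hneg
    omega
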